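-- pv_equiv track=rewrite | github.com/kimdy003/Python_study | 3_KDT/1W_Day_05/lv3_게임아이템.py | solution
-- ===== SOURCE A (Python) =====
-- import heapq
-- from collections import deque
--
-- def solution(healths, items):
--     answer = []
--     healths.sort()
--     items = deque(sorted([(item[1], item[0], index + 1) for index, item in enumerate(items)]))
--     heap = []
--
--     for health in healths:
--         while items:
--             debuff, buff, index = items[0]
--
--             if health - debuff < 100:
--                 break
--             items.popleft()
--             heapq.heappush(heap, (-buff, index))
--
--         if heap:
--             _, index = heapq.heappop(heap)
--             answer.append(index)
--
--     return sorted(answer)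
-- ===== SOURCE B (Python) =====
-- def solution(healths, items):
--     healths.sort()
--     used = [False] * len(items)
--     answer = []
--     for health in healths:
--         best = -1
--         best_buff = 0
--         for j, item in enumerate(items):
--             if used[j] or health - item[1] < 100:
--                 continue
--             if best == -1 or item[0] > best_buff:
--                 best, best_buff = j, item[0]
--         if best != -1:
--             used[best] = True
--             answer.append(best + 1)
--     return sorted(answer)
-- ===== Notes on version B (the rewrite author's own statement) =====
-- stated objective: simpler
-- what changed: Replaced the item-sort + deque + heapq machinery by a used-flag array with one linear scan per health that picks the affordable unused item of maximum buff (ties to the smallest index), which is exactly the element the (-buff, index) heap pops.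
-- outside the precondition, e.g. on solution([150], [[5]]): A raises IndexError, B raises IndexError
import Mathlib
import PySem

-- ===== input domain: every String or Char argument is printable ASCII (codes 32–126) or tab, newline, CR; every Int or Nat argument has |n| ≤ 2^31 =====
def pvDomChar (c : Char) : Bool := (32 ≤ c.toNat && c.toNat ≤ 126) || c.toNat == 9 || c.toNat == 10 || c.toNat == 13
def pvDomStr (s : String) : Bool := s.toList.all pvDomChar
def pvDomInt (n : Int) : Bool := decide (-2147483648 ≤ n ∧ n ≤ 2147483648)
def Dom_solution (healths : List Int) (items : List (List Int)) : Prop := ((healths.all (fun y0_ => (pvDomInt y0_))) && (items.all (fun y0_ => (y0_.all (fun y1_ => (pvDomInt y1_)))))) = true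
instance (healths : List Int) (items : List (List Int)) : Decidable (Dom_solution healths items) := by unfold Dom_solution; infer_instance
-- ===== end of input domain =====

-- B replaces A's sort+deque+heap greedy by a used-flag array with one max-buff scan per health
-- (objective: simpler).  Both Pythons sort `healths` in place; the equivalence proved here is
-- about the return value (the mutation is identical in A and B).

-- ===== PORT A =====
-- Python tuple order on the (debuff, buff, index) triples (all ints; lexicographic).
def tripLe (a b : Int × Int × Int) : Prop :=
  a.1 < b.1 ∨ (a.1 = b.1 ∧ (a.2.1 < b.2.1 ∨ (a.2.1 = b.2.1 ∧ a.2.2 ≤ b.2.2)))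

def tripLeDec : DecidableRel tripLe := fun a b => by unfold tripLe; infer_instance

-- Python tuple order on the (-buff, index) heap entries.
def pairLe (a b : Int × Int) : Prop := a.1 < b.1 ∨ (a.1 = b.1 ∧ a.2 ≤ b.2)

def pairLeDec : DecidableRel pairLe := fun a b => by unfold pairLe; infer_instance

-- item[1] / item[0]; exact under Pre_solution (2 ≤ item.length), where Python never raises.
def dOf (item : List Int) : Int := PySem.List.pyGetD item 1 0
def bOf (item : List Int) : Int := PySem.List.pyGetD item 0 0

-- [(item[1], item[0], index+1) for index, item in enumerate(items)]
def tripsOf (items : List (List Int)) : List (Int × Int × Int) :=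
  (PySem.List.enumerate items).map (fun p => (dOf p.2, bOf p.2, p.1 + 1))

-- sorted(...) on the triples: Python's sort is by the (total) lexicographic tuple order, under
-- which insertion sort produces exactly Python's result (the index components are distinct, so
-- the sorted arrangement is unique and stability is irrelevant).
def sortTrips (l : List (Int × Int × Int)) : List (Int × Int × Int) :=
  @List.insertionSort _ tripLe tripLeDec l

-- heapq modelled by its contract: the heap is kept as a list sorted ascending by the Python
-- tuple order (min at the head); heappush = ordered insert, heappop = head/tail.  Exact for
-- the observable push/pop behaviour (pop returns the minimum entry, here unique).
def heapPush (p : Int × Int) (heap : List (Int × Int)) : List (Int × Int) :=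
  @List.orderedInsert _ pairLe pairLeDec p heap

-- the inner `while items: ...` loop of A
def releaseA (h : Int) : List (Int × Int × Int) → List (Int × Int) →
    List (Int × Int × Int) × List (Int × Int)
  | [], heap => ([], heap)
  | t :: rest, heap =>
    if h - t.1 < 100 then (t :: rest, heap)
    else releaseA h rest (heapPush (-t.2.1, t.2.2) heap)

-- the outer `for health in healths:` loop of A
def loopA : List Int → List (Int × Int × Int) → List (Int × Int) → List Int → List Int
  | [], _, _, ans => PySem.List.sorted ans (fun x => x)
  | h :: hs, dq, heap, ans =>
    let s := releaseA h dq heap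
    match s.2 with
    | [] => loopA hs s.1 s.2 ans
    | q :: rest => loopA hs s.1 rest (ans ++ [q.2])

def solution (healths : List Int) (items : List (List Int)) : List Int :=
  loopA (PySem.List.sorted healths (fun x => x)) (sortTrips (tripsOf items)) [] []

-- ===== PORT B =====
-- the inner `for j, item in enumerate(items):` scan of B; the accumulator is (best, best_buff),
-- `none` rendering Python's `best == -1` sentinel.  used[j]: j is always in range, so getD is exact.
def bestScan (h : Int) (items : List (List Int)) (used : List Bool) : Option (Int × Int) :=
  (PySem.List.enumerate items).foldl (fun best p =>
    if used.getD p.1.toNat false || decide (h - PySem.List.pyGetD p.2 1 0 < 100) then best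
    else match best with
      | none => some (p.1, PySem.List.pyGetD p.2 0 0)
      | some q => if PySem.List.pyGetD p.2 0 0 > q.2 then some (p.1, PySem.List.pyGetD p.2 0 0)
                  else some q) none

-- the outer `for health in healths:` loop of B
def loopB (items : List (List Int)) : List Int → List Bool → List Int → List Int
  | [], _, ans => PySem.List.sorted ans (fun x => x)
  | h :: hs, used, ans =>
    match bestScan h items used with
    | none => loopB items hs used ans
    | some q => loopB items hs (used.set q.1.toNat true) (ans ++ [q.1 + 1])

def solution_alt (healths : List Int) (items : List (List Int)) : List Int :=
  loopB items (PySem.List.sorted healths (fun x => x)) (List.replicate items.length false) []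

-- ===== PRECONDITION & SPEC =====
-- Pre_ excludes exactly the inputs where Python A raises: item[1] (and item[0]) is an
-- IndexError on an item with fewer than two entries.
def Pre_solution (healths : List Int) (items : List (List Int)) : Prop :=
  ∀ item ∈ items, 2 ≤ item.length
instance (healths : List Int) (items : List (List Int)) : Decidable (Pre_solution healths items) := by
  unfold Pre_solution; infer_instance

def pvWitness_solution : List Int × List (List Int) := ([150, 120], [[10, 5], [7, 20]])

def Spec_solution (healths : List Int) (items : List (List Int)) (out : List Int) : Prop := out = solution_alt healths items
instance (healths : List Int) (items : List (List Int)) (out : List Int) : Decidable (Spec_solution healths items out) := by unfold Spec_solution; infer_instance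

-- ===== CLAIM (what is proved, stated in full; the proofs are below) =====
def Claim_equal_solution : Prop := ∀ (healths : List Int) (items : List (List Int)), Dom_solution healths items → Pre_solution healths items → Spec_solution healths items (solution healths items)

-- ===== LEMMAS AND PROOFS =====

-- order facts for the two Python tuple orders
theorem pairLe_refl (a : Int × Int) : pairLe a a := by unfold pairLe; omega

theorem pairLe_trans : IsTrans (Int × Int) pairLe := ⟨by intro a b c; unfold pairLe; omega⟩

theorem pairLe_total : Std.Total pairLe := ⟨by intro a b; unfold pairLe; omega⟩

theorem pairLe_antisymm {a b : Int × Int} (h1 : pairLe a b) (h2 : pairLe b a) : a = b := by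
  unfold pairLe at h1 h2
  obtain ⟨x, y⟩ := a; obtain ⟨z, w⟩ := b
  simp only [Prod.mk.injEq]
  constructor <;> omega

theorem tripLe_trans : IsTrans (Int × Int × Int) tripLe := ⟨by intro a b c; unfold tripLe; omega⟩

theorem tripLe_total : Std.Total tripLe := ⟨by intro a b; unfold tripLe; omega⟩

theorem sortTrips_pairwise (l : List (Int × Int × Int)) : (sortTrips l).Pairwise tripLe :=
  @List.pairwise_insertionSort _ tripLe tripLeDec tripLe_total tripLe_trans l

theorem sortTrips_perm (l : List (Int × Int × Int)) : (sortTrips l).Perm l :=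
  @List.perm_insertionSort _ tripLe tripLeDec l

theorem sortTrips_d_pairwise (l : List (Int × Int × Int)) :
    (sortTrips l).Pairwise (fun a b => a.1 ≤ b.1) :=
  (sortTrips_pairwise l).imp (by intro a b h; unfold tripLe at h; omega)

-- the inner while loop of A releases exactly the affordable prefix of the d-sorted deque
theorem releaseA_eq (h : Int) : ∀ (L : List (Int × Int × Int)) (heap : List (Int × Int)),
    L.Pairwise (fun a b => a.1 ≤ b.1) →
    releaseA h L heap = (L.filter (fun t => decide (h - 100 < t.1)),
      (L.filter (fun t => decide (t.1 ≤ h - 100))).foldl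
        (fun H t => heapPush (-t.2.1, t.2.2) H) heap) := by
  intro L
  induction L with
  | nil => intro heap _; rfl
  | cons t rest ih =>
    intro heap hpw
    rw [List.pairwise_cons] at hpw
    by_cases hc : h - t.1 < 100
    · have h1 : (t :: rest).filter (fun t => decide (h - 100 < t.1)) = t :: rest :=
        List.filter_eq_self.mpr (by
          intro a ha; rcases List.mem_cons.mp ha with rfl | ha
          · simp; omega
          · have := hpw.1 a ha; simp; omega)
      have h2 : (t :: rest).filter (fun t => decide (t.1 ≤ h - 100)) = [] :=
        List.filter_eq_nil_iff.mpr (by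
          intro a ha; rcases List.mem_cons.mp ha with rfl | ha
          · simp; omega
          · have := hpw.1 a ha; simp; omega)
      rw [h1, h2]
      simp [releaseA, hc]
    · have ht : t.1 ≤ h - 100 := by omega
      have h1 : (t :: rest).filter (fun t => decide (h - 100 < t.1))
          = rest.filter (fun t => decide (h - 100 < t.1)) := by
        rw [List.filter_cons]; simp; omega
      have h2 : (t :: rest).filter (fun t => decide (t.1 ≤ h - 100))
          = t :: rest.filter (fun t => decide (t.1 ≤ h - 100)) := by
        rw [List.filter_cons]; simp; omega
      rw [h1, h2]
      simp only [releaseA, if_neg hc, List.foldl_cons]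
      exact ih _ hpw.2

-- folding heapPush keeps the heap sorted and acts as list append up to permutation
theorem pushAll_pairwise : ∀ (l : List (Int × Int × Int)) (heap : List (Int × Int)),
    heap.Pairwise pairLe →
    (l.foldl (fun H t => heapPush (-t.2.1, t.2.2) H) heap).Pairwise pairLe := by
  intro l
  induction l with
  | nil => intro heap hp; exact hp
  | cons t rest ih =>
    intro heap hp
    exact ih _ (@List.Pairwise.orderedInsert _ pairLe pairLeDec pairLe_total pairLe_trans _ _ hp)

theorem pushAll_perm : ∀ (l : List (Int × Int × Int)) (heap : List (Int × Int)),
    (l.foldl (fun H t => heapPush (-t.2.1, t.2.2) H) heap).Perm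
      (heap ++ l.map (fun t => (-t.2.1, t.2.2))) := by
  intro l
  induction l with
  | nil => intro heap; simp
  | cons t rest ih =>
    intro heap
    simp only [List.foldl_cons, List.map_cons]
    refine (ih _).trans ?_
    refine (List.Perm.append_right _ (@List.perm_orderedInsert _ pairLe pairLeDec _ heap)).trans ?_
    exact List.perm_middle.symm

-- a filter split along a stronger predicate, up to permutation
theorem perm_filter_split {α : Type} (p q : α → Bool) (hpq : ∀ a, q a = true → p a = true) :
    ∀ (l : List α), (l.filter p).Perm (l.filter q ++ l.filter (fun a => p a && !q a)) := by
  intro l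
  induction l with
  | nil => simp
  | cons a l ih =>
    by_cases hq : q a
    · have hp := hpq a hq
      simp only [List.filter_cons, hp, hq, Bool.not_true, Bool.and_false, ite_true,
        List.cons_append]
      exact ih.cons a
    · simp only [List.filter_cons, hq, Bool.not_false, Bool.and_true]
      by_cases hp : p a
      · simp only [hp, ite_true]
        exact (ih.cons a).trans List.perm_middle.symm
      · simp only [hp]
        exact ih

-- the B-side selection data
def tripFn (p : Int × List Int) : Int × Int × Int := (dOf p.2, bOf p.2, p.1 + 1)

def pairOf (p : Int × List Int) : Int × Int := (-(bOf p.2), p.1 + 1)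

def elig (c : Int) (used : List Bool) (p : Int × List Int) : Bool :=
  !(used.getD p.1.toNat false) && decide (dOf p.2 ≤ c)

def P (items : List (List Int)) (c : Int) (used : List Bool) : List (Int × Int) :=
  ((PySem.List.enumerate items).filter (elig c used)).map pairOf

-- facts about enumerate
theorem enum_fst_nonneg {items : List (List Int)} {p : Int × List Int}
    (hp : p ∈ PySem.List.enumerate items) : 0 ≤ p.1 := by
  rw [PySem.List.mem_enumerate_iff] at hp
  obtain ⟨k, hk, rfl⟩ := hp
  simp
theorem enum_fst_toNat_lt {items : List (List Int)} {p : Int × List Int}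
    (hp : p ∈ PySem.List.enumerate items) : p.1.toNat < items.length := by
  rw [PySem.List.mem_enumerate_iff] at hp
  obtain ⟨k, hk, rfl⟩ := hp
  simpa using hk

theorem enum_eq_of_fst_eq {items : List (List Int)} {p q : Int × List Int}
    (hp : p ∈ PySem.List.enumerate items) (hq : q ∈ PySem.List.enumerate items)
    (h : p.1 = q.1) : p = q := by
  rw [PySem.List.mem_enumerate_iff] at hp hq
  obtain ⟨k, hk, rfl⟩ := hp
  obtain ⟨k', hk', rfl⟩ := hq
  have : k = k' := by omega
  subst this; rfl

-- B's guarded scan is the pure max-fold over the eligible sublist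
def stepB (best : Option (Int × Int)) (p : Int × List Int) : Option (Int × Int) :=
  match best with
  | none => some (p.1, bOf p.2)
  | some q => if bOf p.2 > q.2 then some (p.1, bOf p.2) else some q

theorem bestScan_eq (h : Int) (items : List (List Int)) (used : List Bool) :
    bestScan h items used
      = ((PySem.List.enumerate items).filter (elig (h - 100) used)).foldl stepB none := by
  unfold bestScan
  rw [List.foldl_filter]
  apply List.foldl_ext
  intro acc p hp
  have hg : (used.getD p.1.toNat false || decide (h - PySem.List.pyGetD p.2 1 0 < 100))
      = !(elig (h - 100) used p) := by
    unfold elig dOf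
    cases hu : used.getD p.1.toNat false
    · simp only [Bool.false_or, Bool.not_false, Bool.true_and]
      rw [Bool.eq_iff_iff]; simp; omega
    · simp
  rw [hg]
  cases he : elig (h - 100) used p
  · simp
  · simp only [Bool.not_true]
    cases acc <;> rfl

def domP (r q : Int × Int) : Prop := q.2 < r.2 ∨ (q.2 = r.2 ∧ r.1 ≤ q.1)

theorem domP_iff_pairLe (e₀ e : Int × List Int) :
    domP (e₀.1, bOf e₀.2) (e.1, bOf e.2) ↔ pairLe (pairOf e₀) (pairOf e) := by
  unfold domP pairLe pairOf
  dsimp only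
  omega

theorem foldl_stepB_some : ∀ (E : List (Int × List Int)) (a : Int × Int),
    (∀ e ∈ E, a.1 < e.1) → E.Pairwise (fun x y => x.1 < y.1) →
    ∃ r, E.foldl stepB (some a) = some r ∧ (r = a ∨ ∃ e ∈ E, r = (e.1, bOf e.2)) ∧ domP r a ∧
      ∀ e ∈ E, domP r (e.1, bOf e.2) := by
  intro E
  induction E with
  | nil =>
    intro a _ _
    exact ⟨a, rfl, Or.inl rfl, Or.inr ⟨rfl, le_refl _⟩, by simp⟩
  | cons p E' ih =>
    intro a ha hpw
    rw [List.pairwise_cons] at hpw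
    simp only [List.foldl_cons]
    by_cases hb : bOf p.2 > a.2
    · have hstep : stepB (some a) p = some (p.1, bOf p.2) := by
        unfold stepB; simp [hb]
      rw [hstep]
      obtain ⟨r, hr, hmem, hdom, hall⟩ := ih (p.1, bOf p.2) (by intro e he; exact hpw.1 e he) hpw.2
      refine ⟨r, hr, ?_, ?_, ?_⟩
      · rcases hmem with rfl | ⟨e, he, rfl⟩
        · exact Or.inr ⟨p, List.mem_cons_self, rfl⟩
        · exact Or.inr ⟨e, List.mem_cons_of_mem _ he, rfl⟩
      · unfold domP at hdom ⊢; dsimp only at hdom ⊢; omega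
      · intro e he
        rcases List.mem_cons.mp he with rfl | he
        · exact hdom
        · exact hall e he
    · have hstep : stepB (some a) p = some a := by
        unfold stepB; simp [hb]
      rw [hstep]
      obtain ⟨r, hr, hmem, hdom, hall⟩ := ih a
        (by intro e he; exact ha e (List.mem_cons_of_mem _ he)) hpw.2
      refine ⟨r, hr, ?_, hdom, ?_⟩
      · rcases hmem with rfl | ⟨e, he, rfl⟩
        · exact Or.inl rfl
        · exact Or.inr ⟨e, List.mem_cons_of_mem _ he, rfl⟩
      · intro e he
        rcases List.mem_cons.mp he with rfl | he
        · have hap : a.1 < e.1 := ha e List.mem_cons_self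
          unfold domP at hdom ⊢; dsimp only at hdom ⊢
          omega
        · exact hall e he

theorem foldl_stepB_none (E : List (Int × List Int)) (hne : E ≠ [])
    (hpw : E.Pairwise (fun x y => x.1 < y.1)) :
    ∃ e₀ ∈ E, E.foldl stepB none = some (e₀.1, bOf e₀.2) ∧
      ∀ e ∈ E, domP (e₀.1, bOf e₀.2) (e.1, bOf e.2) := by
  cases E with
  | nil => exact absurd rfl hne
  | cons p E' =>
    rw [List.pairwise_cons] at hpw
    have h0 : (p :: E').foldl stepB none = E'.foldl stepB (some (p.1, bOf p.2)) := rfl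
    obtain ⟨r, hr, hmem, hdom, hall⟩ :=
      foldl_stepB_some E' (p.1, bOf p.2) (by intro e he; exact hpw.1 e he) hpw.2
    have hform : ∃ e₀ ∈ p :: E', r = (e₀.1, bOf e₀.2) := by
      rcases hmem with rfl | ⟨e, he, rfl⟩
      · exact ⟨p, List.mem_cons_self, rfl⟩
      · exact ⟨e, List.mem_cons_of_mem _ he, rfl⟩
    obtain ⟨e₀, he₀, rfl⟩ := hform
    refine ⟨e₀, he₀, by rw [h0, hr], ?_⟩
    intro e he
    rcases List.mem_cons.mp he with rfl | he
    · exact hdom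
    · exact hall e he

-- marking the chosen item used removes exactly its pair from P
theorem P_set_perm (items : List (List Int)) (c : Int) (used : List Bool)
    (hlen : used.length = items.length) {e₀ : Int × List Int}
    (he₀ : e₀ ∈ PySem.List.enumerate items) (helig : elig c used e₀ = true) :
    (pairOf e₀ :: P items c (used.set e₀.1.toNat true)).Perm (P items c used) := by
  obtain ⟨l₁, l₂, hsplit⟩ := List.append_of_mem he₀
  have hpwe := PySem.List.pairwise_lt_enumerate items 0
  rw [hsplit] at hpwe
  rw [List.pairwise_append] at hpwe
  have hl₁ : ∀ x ∈ l₁, x.1 < e₀.1 := fun x hx => hpwe.2.2 x hx e₀ List.mem_cons_self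
  have hl₂ : ∀ x ∈ l₂, e₀.1 < x.1 := (List.pairwise_cons.mp hpwe.2.1).1
  have h0 : 0 ≤ e₀.1 := enum_fst_nonneg he₀
  have hsame : ∀ x, x ∈ l₁ ∨ x ∈ l₂ →
      elig c (used.set e₀.1.toNat true) x = elig c used x := by
    intro x hx
    have hxe : x ∈ PySem.List.enumerate items := by
      rw [hsplit]
      rcases hx with hx | hx
      · exact List.mem_append_left _ hx
      · exact List.mem_append_right _ (List.mem_cons_of_mem _ hx)
    have hx0 : 0 ≤ x.1 := enum_fst_nonneg hxe
    have hne : x.1 ≠ e₀.1 := by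
      rcases hx with hx | hx
      · exact ne_of_lt (hl₁ x hx)
      · exact (ne_of_lt (hl₂ x hx)).symm
    unfold elig
    have : (used.set e₀.1.toNat true).getD x.1.toNat false = used.getD x.1.toNat false := by
      rw [List.getD_eq_getElem?_getD, List.getD_eq_getElem?_getD,
        List.getElem?_set_ne (by omega)]
    rw [this]
  have he₀lt : e₀.1.toNat < used.length := by rw [hlen]; exact enum_fst_toNat_lt he₀
  have helig' : elig c (used.set e₀.1.toNat true) e₀ = false := by
    unfold elig
    rw [List.getD_eq_getElem?_getD, List.getElem?_set_self he₀lt]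
    rfl
  have heligT : elig c used e₀ = true := helig
  unfold P
  rw [hsplit]
  rw [List.filter_append, List.filter_append, List.filter_cons, List.filter_cons,
    helig', heligT]
  simp only [ite_true]
  rw [List.filter_congr (fun x hx => hsame x (Or.inl hx)),
    List.filter_congr (fun x hx => hsame x (Or.inr hx))]
  rw [List.map_append, List.map_append, List.map_cons]
  exact List.perm_middle.symm

-- the items newly released at health h are exactly the newly eligible ones
theorem new_elig_eq (items : List (List Int)) (c c' : Int) (used : List Bool)
    (hused : ∀ p ∈ PySem.List.enumerate items,
      used.getD p.1.toNat false = true → dOf p.2 ≤ c) :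
    ∀ p ∈ PySem.List.enumerate items,
      (decide (c < dOf p.2) && decide (dOf p.2 ≤ c'))
        = (elig c' used p && !(elig c used p)) := by
  intro p hp
  unfold elig
  cases hu : used.getD p.1.toNat false
  · simp only [Bool.not_false, Bool.true_and]
    rw [Bool.eq_iff_iff]
    simp
    omega
  · have hd : dOf p.2 ≤ c := hused p hp hu
    simp only [Bool.not_true, Bool.false_and]
    rw [Bool.eq_iff_iff]
    simp
    omega

-- the loop invariant
def LoopInv (items : List (List Int)) (c : Int) (used : List Bool)
    (dq : List (Int × Int × Int)) (heap : List (Int × Int)) : Prop :=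
  dq = (sortTrips (tripsOf items)).filter (fun t => decide (c < t.1)) ∧
  heap.Pairwise pairLe ∧ heap.Perm (P items c used) ∧
  (∀ p ∈ PySem.List.enumerate items, used.getD p.1.toNat false = true → dOf p.2 ≤ c) ∧
  used.length = items.length

theorem loop_eq (items : List (List Int)) : ∀ (hs : List Int) (c : Int) (used : List Bool)
    (dq : List (Int × Int × Int)) (heap : List (Int × Int)) (ans : List Int),
    hs.Pairwise (· ≤ ·) → (∀ h' ∈ hs, c ≤ h' - 100) → LoopInv items c used dq heap →
    loopA hs dq heap ans = loopB items hs used ans := by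
  intro hs
  induction hs with
  | nil => intro c used dq heap ans _ _ _; rfl
  | cons h hs ih =>
    intro c used dq heap ans hpwh hle hinv
    obtain ⟨hdq, hpw, hperm, hused, hlen⟩ := hinv
    rw [List.pairwise_cons] at hpwh
    have hcc' : c ≤ h - 100 := hle h List.mem_cons_self
    have hdqpw : dq.Pairwise (fun a b => a.1 ≤ b.1) := by
      rw [hdq]; exact (sortTrips_d_pairwise _).filter _
    -- unfold one step of A
    simp only [loopA]
    rw [releaseA_eq h dq heap hdqpw]
    -- the new deque
    have hdq' : dq.filter (fun t => decide (h - 100 < t.1))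
        = (sortTrips (tripsOf items)).filter (fun t => decide (h - 100 < t.1)) := by
      rw [hdq, List.filter_filter]
      apply List.filter_congr
      intro t _
      rw [Bool.eq_iff_iff]; simp; omega
    -- the new heap
    have hnew : ((dq.filter (fun t => decide (t.1 ≤ h - 100))).map
        (fun t => (-t.2.1, t.2.2))).Perm
        (((PySem.List.enumerate items).filter
          (fun p => elig (h - 100) used p && !(elig c used p))).map pairOf) := by
      rw [hdq, List.filter_filter]
      refine (((sortTrips_perm (tripsOf items)).filter _).map _).trans ?_
      have htf : tripsOf items = (PySem.List.enumerate items).map tripFn := rfl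
      rw [htf, List.filter_map, List.map_map]
      have hcomp : ((fun t : Int × Int × Int => (-t.2.1, t.2.2)) ∘ tripFn) = pairOf := rfl
      rw [hcomp]
      have hfc : List.filter ((fun t : Int × Int × Int => decide (t.1 ≤ h - 100) && decide (c < t.1)) ∘ tripFn) (PySem.List.enumerate items)
          = List.filter (fun p => elig (h - 100) used p && !(elig c used p)) (PySem.List.enumerate items) := by
        apply List.filter_congr
        intro p hp
        have hne := new_elig_eq items c (h - 100) used hused p hp
        simp only [Function.comp_apply]
        rw [← hne, Bool.and_comm]
        rfl
      rw [hfc]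
    have hsplit := perm_filter_split (elig (h - 100) used) (elig c used)
      (by intro a ha; unfold elig at ha ⊢; simp at ha ⊢; exact ⟨ha.1, le_trans ha.2 hcc'⟩)
      (PySem.List.enumerate items)
    have hperm₂ : ((dq.filter (fun t => decide (t.1 ≤ h - 100))).foldl
        (fun H t => heapPush (-t.2.1, t.2.2) H) heap).Perm (P items (h - 100) used) := by
      refine (pushAll_perm _ _).trans ?_
      refine (hperm.append hnew).trans ?_
      unfold P
      refine (List.Perm.symm ?_)
      refine (hsplit.map pairOf).trans ?_
      rw [List.map_append]
    have hpw₂ : ((dq.filter (fun t => decide (t.1 ≤ h - 100))).foldl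
        (fun H t => heapPush (-t.2.1, t.2.2) H) heap).Pairwise pairLe :=
      pushAll_pairwise _ _ hpw
    have hused' : ∀ p ∈ PySem.List.enumerate items,
        used.getD p.1.toNat false = true → dOf p.2 ≤ h - 100 :=
      fun p hp ht => le_trans (hused p hp ht) hcc'
    have hbs := bestScan_eq h items used
    cases hh₂ : (dq.filter (fun t => decide (t.1 ≤ h - 100))).foldl
        (fun H t => heapPush (-t.2.1, t.2.2) H) heap with
    | nil =>
      rw [hh₂] at hperm₂
      have hPnil : P items (h - 100) used = [] := (hperm₂.symm).eq_nil
      have hE : (PySem.List.enumerate items).filter (elig (h - 100) used) = [] := by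
        unfold P at hPnil
        exact List.map_eq_nil_iff.mp hPnil
      have hbnone : bestScan h items used = none := by rw [hbs, hE]; rfl
      simp only [loopB, hbnone]
      exact ih (h - 100) used _ _ ans hpwh.2
        (fun h' hh' => by have := hpwh.1 h' hh'; omega)
        ⟨hdq', List.Pairwise.nil, by rw [hPnil], hused', hlen⟩
    | cons q rest =>
      rw [hh₂] at hperm₂ hpw₂
      have hqmem : q ∈ P items (h - 100) used := hperm₂.mem_iff.mp List.mem_cons_self
      have hqmin : ∀ x ∈ P items (h - 100) used, pairLe q x := by
        intro x hx
        have hx' : x ∈ q :: rest := hperm₂.mem_iff.mpr hx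
        rcases List.mem_cons.mp hx' with rfl | hx'
        · exact pairLe_refl x
        · exact (List.pairwise_cons.mp hpw₂).1 x hx'
      obtain ⟨e₁, he₁mem, he₁pair⟩ := List.mem_map.mp hqmem
      have hEne : (PySem.List.enumerate items).filter (elig (h - 100) used) ≠ [] :=
        List.ne_nil_of_mem he₁mem
      have hEpw : ((PySem.List.enumerate items).filter (elig (h - 100) used)).Pairwise
          (fun x y => x.1 < y.1) :=
        (PySem.List.pairwise_lt_enumerate items 0).filter _
      obtain ⟨e₀, he₀E, hfold, hdom⟩ := foldl_stepB_none _ hEne hEpw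
      have he₀enum : e₀ ∈ PySem.List.enumerate items := List.mem_of_mem_filter he₀E
      have he₀elig : elig (h - 100) used e₀ = true := List.of_mem_filter he₀E
      have h₀min : ∀ x ∈ P items (h - 100) used, pairLe (pairOf e₀) x := by
        intro x hx
        obtain ⟨e, heE, rfl⟩ := List.mem_map.mp hx
        exact (domP_iff_pairLe e₀ e).mp (hdom e heE)
      have h₀P : pairOf e₀ ∈ P items (h - 100) used := List.mem_map_of_mem he₀E
      have hq0 : q = pairOf e₀ := pairLe_antisymm (hqmin _ h₀P) (h₀min _ hqmem)
      have hbsome : bestScan h items used = some (e₀.1, bOf e₀.2) := by rw [hbs, hfold]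
      simp only [loopB, hbsome]
      have hsetperm := P_set_perm items (h - 100) used hlen he₀enum he₀elig
      have hrest : rest.Perm (P items (h - 100) (used.set e₀.1.toNat true)) := by
        have h1 : (q :: rest).Perm (q :: P items (h - 100) (used.set e₀.1.toNat true)) := by
          refine hperm₂.trans ?_
          rw [hq0]
          exact hsetperm.symm
        exact h1.cons_inv
      have hused'' : ∀ p ∈ PySem.List.enumerate items,
          (used.set e₀.1.toNat true).getD p.1.toNat false = true → dOf p.2 ≤ h - 100 := by
        intro p hp ht
        by_cases hpe : p.1 = e₀.1
        · have hpe₀ : p = e₀ := enum_eq_of_fst_eq hp he₀enum hpe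
          subst hpe₀
          unfold elig at he₀elig
          simp only [Bool.and_eq_true, decide_eq_true_eq] at he₀elig
          exact he₀elig.2
        · have hp0 : 0 ≤ p.1 := enum_fst_nonneg hp
          have he0 : 0 ≤ e₀.1 := enum_fst_nonneg he₀enum
          rw [List.getD_eq_getElem?_getD, List.getElem?_set_ne (by omega),
            ← List.getD_eq_getElem?_getD] at ht
          exact hused' p hp ht
      have hq2 : q.2 = e₀.1 + 1 := by rw [hq0]; rfl
      rw [hq2]
      exact ih (h - 100) (used.set e₀.1.toNat true) _ _ (ans ++ [e₀.1 + 1]) hpwh.2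
        (fun h' hh' => by have := hpwh.1 h' hh'; omega)
        ⟨hdq', (List.pairwise_cons.mp hpw₂).2, hrest, hused'', by simp [hlen]⟩

theorem exists_lb : ∀ (l : List Int), ∃ c, ∀ x ∈ l, c ≤ x := by
  intro l
  induction l with
  | nil => exact ⟨0, by simp⟩
  | cons x l ih =>
    obtain ⟨c, hc⟩ := ih
    refine ⟨min c x, ?_⟩
    intro y hy
    rcases List.mem_cons.mp hy with rfl | hy
    · omega
    · have := hc y hy; omega

theorem getD_replicate_false (n k : Nat) : (List.replicate n false).getD k false = false := by
  rw [List.getD_eq_getElem?_getD, List.getElem?_replicate]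
  split <;> rfl

-- ===== VERDICT (by name: the statement is the Claim_ definition above) =====
theorem solution_spec : Claim_equal_solution := by
  intro healths items _ _
  unfold Spec_solution solution solution_alt
  obtain ⟨c₀, hc₀⟩ := exists_lb ((tripsOf items).map (fun t => t.1)
    ++ (PySem.List.sorted healths (fun x => x)).map (fun h => h - 100))
  have hlbd : ∀ t ∈ tripsOf items, c₀ ≤ t.1 := by
    intro t ht
    exact hc₀ _ (List.mem_append_left _ (List.mem_map_of_mem ht))
  have hlbh : ∀ h' ∈ PySem.List.sorted healths (fun x => x), c₀ ≤ h' - 100 := by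
    intro h' hh'
    exact hc₀ _ (List.mem_append_right _ (List.mem_map_of_mem hh'))
  apply loop_eq items _ (c₀ - 1)
  · exact PySem.List.sorted_pairwise healths (fun x => x)
  · intro h' hh'; have := hlbh h' hh'; omega
  · refine ⟨?_, List.Pairwise.nil, ?_, ?_, ?_⟩
    · refine (List.filter_eq_self.mpr ?_).symm
      intro t ht
      have : t ∈ tripsOf items := (sortTrips_perm _).mem_iff.mp ht
      have := hlbd t this
      simp; omega
    · have hPnil : P items (c₀ - 1) (List.replicate items.length false) = [] := by
        unfold P
        rw [List.filter_eq_nil_iff.mpr ?_]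
        · rfl
        · intro p hp
          have : tripFn p ∈ tripsOf items := List.mem_map_of_mem hp
          have hd := hlbd _ this
          unfold tripFn at hd
          dsimp only at hd
          unfold elig
          simp
          omega
      rw [hPnil]
    · intro p hp ht
      rw [getD_replicate_false] at ht
      exact absurd ht (by simp)
    · exact List.length_replicate
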